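-- pv_equiv track=rewrite | github.com/atbrt/Hackathon-Kiro | Résolution/cost.py | lot_change_cost
-- ===== SOURCE A (Python) =====
-- def lot_change_cost(sigma0, sigma1, partition, cost):
--     n = len(sigma0)
--     S = 0
--     def same_lot(i,j,partition):
--         """
--         Une partition est une liste de liste avec les éléments
--         """
--         for liste in partition:
--             if i in liste:
--                 if j in liste:
--                     return True
--         return False
--     for v in range(1, n-1):
--         if not same_lot(sigma0[v],sigma0[v+1], partition):
--             S+= cost
--     return S
-- ===== SOURCE B (Python) =====
-- def lot_change_cost(sigma0, sigma1, partition, cost):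
--     # Two-pass decomposition: label each position of sigma0 with the SET of
--     # lot indices containing the value, then count transitions where the
--     # adjacent label sets are disjoint (handles non-disjoint partitions and
--     # unmapped values exactly like the membership scan).
--     labels = [{k for k, lot in enumerate(partition) if x in lot} for x in sigma0]
--     n = len(sigma0)
--     return sum(cost for v in range(1, n - 1) if labels[v].isdisjoint(labels[v + 1]))
-- ===== Notes on version B (the rewrite author's own statement) =====
-- stated objective: alternative
-- what changed: Replaces the per-pair membership rescans of the partition by a two-pass scheme: one pass labels every position of sigma0 with the set of lot indices containing its value, a second pass sums cost over adjacent positions whose label sets are disjoint.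
import Mathlib
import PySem

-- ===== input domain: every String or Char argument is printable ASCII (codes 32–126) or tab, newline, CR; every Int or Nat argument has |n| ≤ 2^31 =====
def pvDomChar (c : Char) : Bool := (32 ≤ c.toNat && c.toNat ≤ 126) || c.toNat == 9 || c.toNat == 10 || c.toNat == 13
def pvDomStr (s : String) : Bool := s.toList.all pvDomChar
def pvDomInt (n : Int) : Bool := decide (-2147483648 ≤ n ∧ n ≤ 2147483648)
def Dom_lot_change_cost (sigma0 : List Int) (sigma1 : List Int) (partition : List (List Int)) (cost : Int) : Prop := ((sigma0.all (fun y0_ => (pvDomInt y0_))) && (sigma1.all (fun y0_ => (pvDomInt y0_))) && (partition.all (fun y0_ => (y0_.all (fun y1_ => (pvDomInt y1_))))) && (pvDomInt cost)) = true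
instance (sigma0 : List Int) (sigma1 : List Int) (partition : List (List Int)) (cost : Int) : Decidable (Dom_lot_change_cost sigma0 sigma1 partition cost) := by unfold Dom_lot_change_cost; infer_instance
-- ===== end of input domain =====

-- B replaces A's per-pair rescan of the partition by a two-pass scheme (label
-- positions with their sets of lot indices, then count disjoint adjacent labels);
-- same exact return value, similar cost (objective: alternative).

-- ===== PORT A =====
-- inner helper same_lot, transliterated: scan the lots, return True at the
-- first lot containing both i and j, False after the loop.
def sameLot (i j : Int) : List (List Int) → Bool
  | [] => false
  | liste :: rest =>
      if i ∈ liste then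
        (if j ∈ liste then true else sameLot i j rest)
      else sameLot i j rest

def lot_change_cost (sigma0 : List Int) (sigma1 : List Int) (partition : List (List Int)) (cost : Int) : Int :=
  let n : Int := sigma0.length
  (PySem.List.pyRange 1 (n - 1) 1).foldl
    (fun S v =>
      if ¬ (sameLot (PySem.List.pyGetD sigma0 v 0) (PySem.List.pyGetD sigma0 (v + 1) 0) partition = true)
      then S + cost else S) 0

-- ===== PORT B =====
-- labels = [{k for k, lot in enumerate(partition) if x in lot} for x in sigma0]
def lotLabels (sigma0 : List Int) (partition : List (List Int)) : List (List Int) :=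
  sigma0.map (fun x =>
    PySem.Set.ofList ((PySem.List.enumerate partition 0).filterMap
      (fun p => if x ∈ p.2 then some p.1 else none)))

def lot_change_cost_alt (sigma0 : List Int) (sigma1 : List Int) (partition : List (List Int)) (cost : Int) : Int :=
  let labels := lotLabels sigma0 partition
  let n : Int := sigma0.length
  (PySem.List.pyRange 1 (n - 1) 1).foldl
    (fun S v =>
      S + (if PySem.Set.isdisjoint (PySem.List.pyGetD labels v [])
                (PySem.List.pyGetD labels (v + 1) [])
           then cost else 0)) 0

-- ===== PRECONDITION & SPEC =====
def Spec_lot_change_cost (sigma0 : List Int) (sigma1 : List Int) (partition : List (List Int)) (cost : Int) (out : Int) : Prop := out = lot_change_cost_alt sigma0 sigma1 partition cost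
instance (sigma0 : List Int) (sigma1 : List Int) (partition : List (List Int)) (cost : Int) (out : Int) : Decidable (Spec_lot_change_cost sigma0 sigma1 partition cost out) := by unfold Spec_lot_change_cost; infer_instance

-- ===== CLAIM (what is proved, stated in full; the proofs are below) =====
def Claim_equal_lot_change_cost : Prop := ∀ (sigma0 : List Int) (sigma1 : List Int) (partition : List (List Int)) (cost : Int), Dom_lot_change_cost sigma0 sigma1 partition cost → Spec_lot_change_cost sigma0 sigma1 partition cost (lot_change_cost sigma0 sigma1 partition cost)

-- ===== LEMMAS AND PROOFS =====

theorem sameLot_eq_true_iff (i j : Int) (P : List (List Int)) :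
    sameLot i j P = true ↔ ∃ l ∈ P, i ∈ l ∧ j ∈ l := by
  induction P with
  | nil => simp [sameLot]
  | cons l rest ih =>
      simp only [sameLot]
      split_ifs with hi hj
      · simp [hi, hj]
      · simp only [List.mem_cons, ih]
        constructor
        · rintro ⟨l', hl', h⟩; exact ⟨l', Or.inr hl', h⟩
        · rintro ⟨l', hl' | hl', h⟩
          · exact absurd (hl' ▸ h.2) hj
          · exact ⟨l', hl', h⟩
      · simp only [List.mem_cons, ih]
        constructor
        · rintro ⟨l', hl', h⟩; exact ⟨l', Or.inr hl', h⟩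
        · rintro ⟨l', hl' | hl', h⟩
          · exact absurd (hl' ▸ h.1) hi
          · exact ⟨l', hl', h⟩

-- membership in the label set of x
theorem mem_label_iff (x k : Int) (P : List (List Int)) :
    k ∈ PySem.Set.ofList ((PySem.List.enumerate P 0).filterMap
        (fun p => if x ∈ p.2 then some p.1 else none)) ↔
      ∃ (m : Nat) (h : m < P.length), k = (m : Int) ∧ x ∈ P[m] := by
  rw [PySem.Set.mem_ofList, List.mem_filterMap]
  constructor
  · rintro ⟨p, hp, hf⟩
    rw [PySem.List.mem_enumerate_iff] at hp
    obtain ⟨m, hm, rfl⟩ := hp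
    by_cases hx : x ∈ P[m]
    · simp [hx] at hf
      exact ⟨m, hm, by omega, hx⟩
    · simp [hx] at hf
  · rintro ⟨m, hm, rfl, hx⟩
    refine ⟨((m : Int), P[m]), ?_, by simp [hx]⟩
    rw [PySem.List.mem_enumerate_iff]
    exact ⟨m, hm, by simp⟩

-- the disjointness test of B is the negation of A's same_lot
theorem disjoint_iff_not_sameLot (i j : Int) (P : List (List Int)) :
    PySem.Set.isdisjoint
      (PySem.Set.ofList ((PySem.List.enumerate P 0).filterMap
        (fun p => if i ∈ p.2 then some p.1 else none)))
      (PySem.Set.ofList ((PySem.List.enumerate P 0).filterMap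
        (fun p => if j ∈ p.2 then some p.1 else none))) = true ↔
      ¬ sameLot i j P = true := by
  rw [PySem.Set.isdisjoint_iff, sameLot_eq_true_iff]
  constructor
  · rintro h ⟨l, hl, hi, hj⟩
    obtain ⟨m, hm, rfl⟩ := List.mem_iff_getElem.mp hl
    exact h (m : Int) ((mem_label_iff i (m : Int) P).mpr ⟨m, hm, rfl, hi⟩)
      ((mem_label_iff j (m : Int) P).mpr ⟨m, hm, rfl, hj⟩)
  · intro h k hk hk'
    obtain ⟨m, hm, hkm, hi⟩ := (mem_label_iff i k P).mp hk
    obtain ⟨m', hm', hkm', hj⟩ := (mem_label_iff j k P).mp hk'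
    have hmm : m' = m := by omega
    simp only [hmm] at hj
    exact h ⟨P[m], List.getElem_mem hm, hi, hj⟩

theorem length_lotLabels (sigma0 : List Int) (P : List (List Int)) :
    (lotLabels sigma0 P).length = sigma0.length := by
  simp [lotLabels]

-- ===== VERDICT (by name: the statement is the Claim_ definition above) =====
theorem lot_change_cost_spec : Claim_equal_lot_change_cost := by
  intro sigma0 sigma1 partition cost _
  unfold Spec_lot_change_cost lot_change_cost lot_change_cost_alt
  show (PySem.List.pyRange 1 ((sigma0.length : Int) - 1) 1).foldl
      (fun S v =>
        if ¬ (sameLot (PySem.List.pyGetD sigma0 v 0) (PySem.List.pyGetD sigma0 (v + 1) 0) partition = true)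
        then S + cost else S) 0 =
    (PySem.List.pyRange 1 ((sigma0.length : Int) - 1) 1).foldl
      (fun S v =>
        S + (if PySem.Set.isdisjoint (PySem.List.pyGetD (lotLabels sigma0 partition) v [])
                  (PySem.List.pyGetD (lotLabels sigma0 partition) (v + 1) [])
             then cost else 0)) 0
  apply PySem.List.foldl_congr_mem
  intro S v hv
  rw [PySem.List.mem_pyRange_one] at hv
  have hlen : 0 < sigma0.length := by omega
  have hv1 : 0 ≤ v := by omega
  have hv2 : v < (sigma0.length : Int) := by omega
  have hw2 : v + 1 < (sigma0.length : Int) := by omega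
  have hL : (lotLabels sigma0 partition).length = sigma0.length := length_lotLabels _ _
  have e1 : PySem.List.pyGetD sigma0 v 0 = sigma0[v.toNat]'(by omega) := by
    rw [PySem.List.pyGetD_eq_getElem] <;> omega
  have e2 : PySem.List.pyGetD sigma0 (v + 1) 0 = sigma0[(v+1).toNat]'(by omega) := by
    rw [PySem.List.pyGetD_eq_getElem] <;> omega
  have f1 : PySem.List.pyGetD (lotLabels sigma0 partition) v [] =
      (lotLabels sigma0 partition)[v.toNat]'(by omega) := by
    rw [PySem.List.pyGetD_eq_getElem] <;> omega
  have f2 : PySem.List.pyGetD (lotLabels sigma0 partition) (v + 1) [] =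
      (lotLabels sigma0 partition)[(v+1).toNat]'(by omega) := by
    rw [PySem.List.pyGetD_eq_getElem] <;> omega
  rw [e1, e2, f1, f2]
  have g1 : (lotLabels sigma0 partition)[v.toNat]'(by omega) =
      PySem.Set.ofList ((PySem.List.enumerate partition 0).filterMap
        (fun p => if sigma0[v.toNat] ∈ p.2 then some p.1 else none)) := by
    simp [lotLabels]
  have g2 : (lotLabels sigma0 partition)[(v+1).toNat]'(by omega) =
      PySem.Set.ofList ((PySem.List.enumerate partition 0).filterMap
        (fun p => if sigma0[(v+1).toNat] ∈ p.2 then some p.1 else none)) := by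
    simp [lotLabels]
  rw [g1, g2]
  by_cases hs : sameLot sigma0[v.toNat] sigma0[(v+1).toNat] partition = true
  · have hd : ¬ PySem.Set.isdisjoint
        (PySem.Set.ofList ((PySem.List.enumerate partition 0).filterMap
          (fun p => if sigma0[v.toNat] ∈ p.2 then some p.1 else none)))
        (PySem.Set.ofList ((PySem.List.enumerate partition 0).filterMap
          (fun p => if sigma0[(v+1).toNat] ∈ p.2 then some p.1 else none))) = true :=
      fun h => (disjoint_iff_not_sameLot _ _ _).mp h hs
    rw [if_neg (by simp [hs]), if_neg hd]
    omega
  · have hd := (disjoint_iff_not_sameLot sigma0[v.toNat] sigma0[(v+1).toNat] partition).mpr hs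
    rw [if_pos hs, if_pos hd]
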